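-- pv_equiv track=rewrite | github.com/jarvisluk/thematic-analysis-skill | scripts/validate_quotes.py | quote_in_transcript
-- ===== SOURCE A (Python) =====
-- def quote_in_transcript(quote: str, transcript: str) -> bool:
--     if not quote:
--         return False
--     if "..." in quote:
--         segments = [seg for seg in (s.strip() for s in quote.split("...")) if seg]
--         pos = 0
--         for seg in segments:
--             idx = transcript.find(seg, pos)
--             if idx == -1:
--                 return False
--             pos = idx + len(seg)
--         return True
--     return quote in transcript
-- ===== SOURCE B (Python) =====
-- def quote_in_transcript(quote: str, transcript: str) -> bool:
--     if not quote:
--         return False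
--     if "..." not in quote:
--         return quote in transcript
--     rest = transcript
--     for part in reversed(quote.split("...")):
--         seg = part.strip()
--         if not seg:
--             continue
--         idx = rest.rfind(seg)
--         if idx == -1:
--             return False
--         rest = rest[:idx]
--     return True
-- ===== Notes on version B (the rewrite author's own statement) =====
-- stated objective: alternative
-- what changed: A scans the '...'-segments left to right, advancing an absolute index with transcript.find(seg, pos) over a pre-filtered segment list; B scans the segments in reverse order, matching each with rfind inside a shrinking prefix of the transcript (rest = rest[:idx]), stripping and skipping empty segments inline.
import Mathlib
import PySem

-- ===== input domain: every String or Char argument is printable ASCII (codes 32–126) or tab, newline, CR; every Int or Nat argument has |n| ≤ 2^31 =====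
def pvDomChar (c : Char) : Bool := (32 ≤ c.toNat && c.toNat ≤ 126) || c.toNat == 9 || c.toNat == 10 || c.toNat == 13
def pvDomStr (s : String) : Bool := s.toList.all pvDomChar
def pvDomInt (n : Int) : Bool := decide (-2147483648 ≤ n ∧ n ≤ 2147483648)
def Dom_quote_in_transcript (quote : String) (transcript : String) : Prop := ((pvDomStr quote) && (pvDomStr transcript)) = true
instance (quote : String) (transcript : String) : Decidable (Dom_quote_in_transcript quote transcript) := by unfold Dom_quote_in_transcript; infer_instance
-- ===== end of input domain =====

-- B replaces A's forward scan (advancing absolute index via transcript.find(seg, pos) over a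
-- pre-filtered segment list) by a backward scan: the segments are processed in reverse order,
-- each matched by rfind inside a shrinking prefix of the transcript (objective: alternative).

-- ===== PORT A =====
-- A's loop: for seg in segments: idx = transcript.find(seg, pos); pos = idx + len(seg)
def qitLoopA (t : List Char) (segs : List (List Char)) (pos : Int) : Bool :=
  match segs with
  | [] => true
  | seg :: rest =>
    if PySem.Chars.findFrom t seg pos none = -1 then false
    else qitLoopA t rest (PySem.Chars.findFrom t seg pos none + seg.length)

def quote_in_transcript (quote : String) (transcript : String) : Bool :=
  if quote.toList.isEmpty then false
  else if PySem.Chars.isIn "...".toList quote.toList then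
    qitLoopA transcript.toList
      (((PySem.Chars.splitOn quote.toList "...".toList).map PySem.Chars.strip).filter
        (fun s => !s.isEmpty)) 0
  else PySem.Chars.isIn quote.toList transcript.toList

-- ===== PORT B =====
-- B's loop: for part in reversed(quote.split("...")): seg = part.strip();
--           idx = rest.rfind(seg); rest = rest[:idx]
def qitLoopB (rest : List Char) (parts : List (List Char)) : Bool :=
  match parts with
  | [] => true
  | part :: ps =>
    if (PySem.Chars.strip part).isEmpty then qitLoopB rest ps
    else if PySem.Chars.rfind rest (PySem.Chars.strip part) = -1 then false
    else
      qitLoopB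
        (PySem.List.slice rest none (some (PySem.Chars.rfind rest (PySem.Chars.strip part)))) ps

def quote_in_transcript_alt (quote : String) (transcript : String) : Bool :=
  if quote.toList.isEmpty then false
  else if !(PySem.Chars.isIn "...".toList quote.toList) then
    PySem.Chars.isIn quote.toList transcript.toList
  else
    qitLoopB transcript.toList (PySem.Chars.splitOn quote.toList "...".toList).reverse

-- ===== PRECONDITION & SPEC =====
def Spec_quote_in_transcript (quote : String) (transcript : String) (out : Bool) : Prop := out = quote_in_transcript_alt quote transcript
instance (quote : String) (transcript : String) (out : Bool) : Decidable (Spec_quote_in_transcript quote transcript out) := by unfold Spec_quote_in_transcript; infer_instance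

-- ===== CLAIM (what is proved, stated in full; the proofs are below) =====
def Claim_equal_quote_in_transcript : Prop := ∀ (quote : String) (transcript : String), Dom_quote_in_transcript quote transcript → Spec_quote_in_transcript quote transcript (quote_in_transcript quote transcript)

-- ===== LEMMAS AND PROOFS =====

-- 'the segments appear in order, left to right': head segment at i, rest after it
def Occ : List (List Char) → List Char → Prop
  | [], _ => True
  | s :: ss, t => ∃ i : Nat, s <+: t.drop i ∧ Occ ss (t.drop (i + s.length))

-- 'the segments appear in order, scanned right to left': head (= rightmost segment) at i, rest before it
def OccR : List (List Char) → List Char → Prop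
  | [], _ => True
  | s :: ss, t => ∃ i : Nat, s <+: t.drop i ∧ OccR ss (t.take i)

lemma occ_shift (ss : List (List Char)) (u : List Char) (d : Nat)
    (h : Occ ss (u.drop d)) : Occ ss u := by
  cases ss with
  | nil => trivial
  | cons s ss =>
    obtain ⟨i, h1, h2⟩ := h
    refine ⟨d + i, ?_, ?_⟩
    · rwa [List.drop_drop] at h1
    · rw [List.drop_drop] at h2
      rw [show d + i + s.length = d + (i + s.length) by omega]
      exact h2

-- greedy-earliest step: a first segment can always be matched at its FIRST occurrence
lemma occ_cons_iff (seg : List Char) (ss : List (List Char)) (u : List Char) :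
    Occ (seg :: ss) u ↔
      (PySem.Chars.find u seg ≠ -1 ∧
        Occ ss (u.drop ((PySem.Chars.find u seg).toNat + seg.length))) := by
  constructor
  · rintro ⟨i, hpre, hocc⟩
    have hin : seg <:+: u := hpre.isInfix.trans (List.drop_suffix _ _).isInfix
    have hne : PySem.Chars.find u seg ≠ -1 := by
      rw [Ne, PySem.Chars.find_eq_neg_one_iff]; exact fun h => h hin
    have hnn : 0 ≤ PySem.Chars.find u seg := by
      have := PySem.Chars.neg_one_le_find u seg; omega
    obtain ⟨hfpre, hmin⟩ := PySem.Chars.find_spec hnn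
    set f := (PySem.Chars.find u seg).toNat with hf
    have hfi : f ≤ i := by
      by_contra hlt
      exact hmin i (by omega) hpre
    refine ⟨hne, ?_⟩
    have heq : u.drop (i + seg.length) = (u.drop (f + seg.length)).drop (i - f) := by
      rw [List.drop_drop]; congr 1; omega
    rw [heq] at hocc
    exact occ_shift _ _ _ hocc
  · rintro ⟨hne, hocc⟩
    have hnn : 0 ≤ PySem.Chars.find u seg := by
      have := PySem.Chars.neg_one_le_find u seg; omega
    exact ⟨(PySem.Chars.find u seg).toNat, (PySem.Chars.find_spec hnn).1, hocc⟩

-- enlarging the prefix window keeps right-to-left occurrences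
lemma occR_take_mono (ss : List (List Char)) (u : List Char) (i j : Nat)
    (hss : ∀ s ∈ ss, s ≠ []) (hij : i ≤ j)
    (h : OccR ss (u.take i)) : OccR ss (u.take j) := by
  cases ss with
  | nil => trivial
  | cons s ss =>
    obtain ⟨m, hpre, hocc⟩ := h
    have hs : s ≠ [] := hss s (by simp)
    have hs0 : 0 < s.length := List.length_pos_of_ne_nil hs
    have h1 := hpre.length_le
    simp only [List.length_drop, List.length_take] at h1
    have hm : m + s.length ≤ i ∧ m + s.length ≤ u.length := by omega
    refine ⟨m, ?_, ?_⟩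
    · rw [List.drop_take] at hpre ⊢
      rw [List.prefix_take_iff] at hpre ⊢
      exact ⟨hpre.1, by omega⟩
    · rw [List.take_take] at hocc ⊢
      rw [show min m j = m by omega]
      rw [show min m i = m by omega] at hocc
      exact hocc

-- rfind.go finds the LAST occurrence at or below the fuel index
lemma rfindGo_spec (s sub : List Char) (n : Nat) :
    (PySem.Chars.rfind.go s sub n = -1 ∧ ∀ i ≤ n, ¬ sub <+: s.drop i) ∨
    (∃ j : Nat, PySem.Chars.rfind.go s sub n = (j : Int) ∧ j ≤ n ∧ sub <+: s.drop j ∧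
      ∀ i, j < i → i ≤ n → ¬ sub <+: s.drop i) := by
  induction n with
  | zero =>
    unfold PySem.Chars.rfind.go
    by_cases h : sub.isPrefixOf s
    · right
      exact ⟨0, by simp [h], le_refl 0, by simpa [List.isPrefixOf_iff_prefix] using h,
        by omega⟩
    · left
      refine ⟨by simp [h], ?_⟩
      intro i hi
      interval_cases i
      simpa [List.isPrefixOf_iff_prefix] using h
  | succ n ih =>
    have hgo : PySem.Chars.rfind.go s sub (n+1) =
        if sub.isPrefixOf (List.drop (n + 1) s) then (((n + 1 : Nat)) : Int)
        else PySem.Chars.rfind.go s sub n := by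
      conv_lhs => unfold PySem.Chars.rfind.go
    by_cases h : sub.isPrefixOf (List.drop (n + 1) s)
    · right
      refine ⟨n + 1, by rw [hgo]; simp [h], le_refl _,
        by simpa [List.isPrefixOf_iff_prefix] using h, by omega⟩
    · rw [hgo, if_neg (by simp [h])]
      rcases ih with ⟨h1, h2⟩ | ⟨j, h1, h2, h3, h4⟩
      · left
        refine ⟨h1, ?_⟩
        intro i hi
        rcases Nat.lt_or_ge i (n+1) with hlt | hge
        · exact h2 i (by omega)
        · have : i = n + 1 := by omega
          subst this
          simpa [List.isPrefixOf_iff_prefix] using h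
      · right
        refine ⟨j, h1, by omega, h3, ?_⟩
        intro i hji hi
        rcases Nat.lt_or_ge i (n+1) with hlt | hge
        · exact h4 i hji (by omega)
        · have : i = n + 1 := by omega
          subst this
          simpa [List.isPrefixOf_iff_prefix] using h

-- greedy-latest step: the last segment can always be matched at its LAST occurrence
lemma occR_cons_iff (seg : List Char) (ss : List (List Char)) (u : List Char)
    (hseg : seg ≠ []) (hss : ∀ s ∈ ss, s ≠ []) :
    OccR (seg :: ss) u ↔
      (PySem.Chars.rfind u seg ≠ -1 ∧
        OccR ss (u.take (PySem.Chars.rfind u seg).toNat)) := by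
  have hdef : PySem.Chars.rfind u seg = PySem.Chars.rfind.go u seg u.length := rfl
  have hspec := rfindGo_spec u seg u.length
  constructor
  · rintro ⟨i, hpre, hocc⟩
    have hi : i ≤ u.length := by
      by_contra hgt
      rw [List.drop_eq_nil_of_le (by omega)] at hpre
      exact hseg (List.prefix_nil.mp hpre)
    rcases hspec with ⟨_, h2⟩ | ⟨j, h1, _, _, h4⟩
    · exact absurd hpre (h2 i hi)
    · have hij : i ≤ j := by
        by_contra hlt
        exact h4 i (by omega) hi hpre
      refine ⟨by rw [hdef, h1]; omega, ?_⟩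
      rw [hdef, h1]
      simp only [Int.toNat_natCast]
      exact occR_take_mono ss u i j hss hij hocc
  · rintro ⟨hne, hocc⟩
    rcases hspec with ⟨h1, _⟩ | ⟨j, h1, _, h3, _⟩
    · rw [hdef] at hne; exact absurd h1 hne
    · rw [hdef, h1] at hocc
      simp only [Int.toNat_natCast] at hocc
      exact ⟨j, h3, hocc⟩

-- appending a final segment to a left-to-right occurrence = matching it after a split point
lemma occ_snoc (ys : List (List Char)) (s : List Char) (t : List Char)
    (hys : ∀ y ∈ ys, y ≠ []) :
    Occ (ys ++ [s]) t ↔ ∃ i : Nat, s <+: t.drop i ∧ Occ ys (t.take i) := by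
  induction ys generalizing t with
  | nil =>
    simp only [List.nil_append]
    constructor
    · rintro ⟨i, hpre, -⟩; exact ⟨i, hpre, trivial⟩
    · rintro ⟨i, hpre, -⟩; exact ⟨i, hpre, trivial⟩
  | cons y ys ih =>
    have hy : y ≠ [] := hys y (by simp)
    have hys' : ∀ x ∈ ys, x ≠ [] := fun x hx => hys x (by simp [hx])
    constructor
    · rintro ⟨j, hj, hocc⟩
      obtain ⟨i, hipre, hiocc⟩ := (ih _ hys').mp hocc
      rw [List.drop_drop] at hipre
      refine ⟨j + y.length + i, hipre, j, ?_, ?_⟩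
      · rw [List.drop_take, List.prefix_take_iff]
        exact ⟨hj, by omega⟩
      · rw [List.drop_take, show j + y.length + i - (j + y.length) = i by omega]
        exact hiocc
    · rintro ⟨i', hpre, j, hj, hocc⟩
      have hjlen : j + y.length ≤ i' := by
        have h1 := hj.length_le
        simp only [List.length_drop, List.length_take] at h1
        have hy0 : 0 < y.length := List.length_pos_of_ne_nil hy
        omega
      rw [List.drop_take] at hj hocc
      refine ⟨j, hj.trans (List.take_prefix _ _), ?_⟩
      refine (ih _ hys').mpr ⟨i' - (j + y.length), ?_, ?_⟩
      · rw [List.drop_drop, show j + y.length + (i' - (j + y.length)) = i' by omega]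
        exact hpre
      · exact hocc

-- bridge: right-to-left occurrence of the reversed list = left-to-right occurrence
lemma occR_iff_occ_reverse (xs : List (List Char)) (t : List Char)
    (h : ∀ x ∈ xs, x ≠ []) :
    OccR xs t ↔ Occ xs.reverse t := by
  induction xs generalizing t with
  | nil => exact Iff.rfl
  | cons x xs ih =>
    have hxs : ∀ y ∈ xs, y ≠ [] := fun y hy => h y (by simp [hy])
    have hrev : ∀ y ∈ xs.reverse, y ≠ [] := fun y hy => hxs y (List.mem_reverse.mp hy)
    rw [List.reverse_cons, occ_snoc _ _ _ hrev]
    constructor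
    · rintro ⟨i, hpre, hocc⟩; exact ⟨i, hpre, (ih _ hxs).mp hocc⟩
    · rintro ⟨i, hpre, hocc⟩; exact ⟨i, hpre, (ih _ hxs).mpr hocc⟩

-- A's loop computes Occ on the remaining suffix
lemma loopA_iff (segs : List (List Char)) (t : List Char)
    (hne : ∀ s ∈ segs, s ≠ []) (k : Nat) (hk : k ≤ t.length) :
    (qitLoopA t segs (k : Int) = true ↔ Occ segs (t.drop k)) := by
  induction segs generalizing k with
  | nil => simp [qitLoopA, Occ]
  | cons seg rest ih =>
    have hseg : seg ≠ [] := hne seg (by simp)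
    have hrest : ∀ s ∈ rest, s ≠ [] := fun s hs => hne s (by simp [hs])
    rw [qitLoopA]
    rw [PySem.Chars.findFrom_natCast t seg k hk]
    by_cases hf : PySem.Chars.find (t.drop k) seg = -1
    · rw [if_pos (by rw [if_pos hf])]
      simp only [Bool.false_eq_true, false_iff]
      rw [occ_cons_iff seg rest _]
      rintro ⟨hne', -⟩
      exact hne' hf
    · have hnn : 0 ≤ PySem.Chars.find (t.drop k) seg := by
        have := PySem.Chars.neg_one_le_find (t.drop k) seg; omega
      have hneq : (k : Int) + PySem.Chars.find (t.drop k) seg ≠ -1 := by omega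
      set g := (PySem.Chars.find (t.drop k) seg).toNat with hg
      have hfit : g + seg.length ≤ t.length - k := by
        have hp := (PySem.Chars.find_spec hnn).1
        have hle := hp.length_le
        have hs0 : 0 < seg.length := List.length_pos_of_ne_nil hseg
        simp only [List.length_drop] at hle
        omega
      rw [if_neg (by rw [if_neg hf]; exact hneq)]
      rw [if_neg hf]
      have hcast : (k : Int) + PySem.Chars.find (t.drop k) seg + (seg.length : Int) =
          ((k + g + seg.length : Nat) : Int) := by
        push_cast
        omega
      rw [hcast, ih hrest (k + g + seg.length) (by omega)]
      rw [occ_cons_iff seg rest _]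
      have hdd : (t.drop k).drop (g + seg.length) = t.drop (k + g + seg.length) := by
        rw [List.drop_drop]; congr 1; omega
      rw [← hdd]
      constructor
      · intro h; exact ⟨hf, h⟩
      · rintro ⟨-, h⟩; exact h

-- B's loop computes OccR of the stripped, non-empty parts
lemma loopB_iff (parts : List (List Char)) (u : List Char) :
    (qitLoopB u parts = true ↔
      OccR ((parts.map PySem.Chars.strip).filter (fun s => !s.isEmpty)) u) := by
  induction parts generalizing u with
  | nil => simp [qitLoopB, OccR]
  | cons p ps ih =>
    rw [qitLoopB]
    simp only [List.map_cons, List.filter_cons]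
    by_cases he : (PySem.Chars.strip p).isEmpty
    · rw [if_pos he]
      simp [he, ih]
    · rw [if_neg (by simp [he])]
      simp only [he, Bool.not_false, if_pos]
      have hseg : PySem.Chars.strip p ≠ [] := by
        intro h; rw [h] at he; simp at he
      have hflt : ∀ s ∈ (ps.map PySem.Chars.strip).filter (fun s => !s.isEmpty), s ≠ [] := by
        intro s hs
        have hmem := (List.mem_filter.mp hs).2
        intro h; rw [h] at hmem; simp at hmem
      rw [occR_cons_iff _ _ u hseg hflt]
      by_cases hr : PySem.Chars.rfind u (PySem.Chars.strip p) = -1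
      · rw [if_pos hr]
        simp only [Bool.false_eq_true, false_iff]
        rintro ⟨hne', -⟩
        exact hne' hr
      · rw [if_neg hr]
        have hnn : 0 ≤ PySem.Chars.rfind u (PySem.Chars.strip p) := by
          rcases rfindGo_spec u (PySem.Chars.strip p) u.length with ⟨h1, -⟩ | ⟨j, h1, -⟩
          · exact absurd h1 hr
          · rw [show PySem.Chars.rfind u (PySem.Chars.strip p)
                = PySem.Chars.rfind.go u (PySem.Chars.strip p) u.length from rfl, h1]
            omega
        rw [PySem.List.slice_to _ hnn, ih]
        constructor
        · intro h; exact ⟨hr, h⟩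
        · rintro ⟨-, h⟩; exact h

theorem quote_in_transcript_spec : Claim_equal_quote_in_transcript := by
  intro q t _
  unfold Spec_quote_in_transcript quote_in_transcript quote_in_transcript_alt
  by_cases hq : q.toList.isEmpty
  · simp [hq]
  · rw [if_neg hq, if_neg hq]
    by_cases hdots : PySem.Chars.isIn "...".toList q.toList = true
    · rw [if_pos hdots, if_neg (by rw [hdots]; simp)]
      set F := ((PySem.Chars.splitOn q.toList "...".toList).map PySem.Chars.strip).filter
        (fun s => !s.isEmpty) with hF
      have hFne : ∀ s ∈ F, s ≠ [] := by
        intro s hs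
        have hmem := (List.mem_filter.mp hs).2
        intro h; rw [h] at hmem; simp at hmem
      apply Bool.coe_iff_coe.mp
      have hA := loopA_iff F t.toList hFne 0 (by omega)
      simp only [Nat.cast_zero] at hA
      rw [hA, loopB_iff]
      rw [List.map_reverse, List.filter_reverse]
      rw [occR_iff_occ_reverse _ _ (fun x hx => hFne x (List.mem_reverse.mp hx))]
      rw [List.reverse_reverse, List.drop_zero]
    · rw [if_neg hdots, if_pos (by rw [Bool.not_eq_true] at hdots; rw [hdots]; rfl)]
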